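-- pv_equiv track=rewrite | github.com/MrBrantCode/unitest_baseline | mut_generate/mist_train_taco/taco_4637/solution.py | is_weird
-- ===== SOURCE A (Python) =====
-- def is_weird(n: int) -> int:
--     # Calculate the sum of proper divisors of n
--     s = 0
--     for i in range(1, n):
--         if n % i == 0:
--             s += i
--
--     # Check if the sum of proper divisors is greater than n
--     if s <= n:
--         return 0
--
--     # Check if no subset of proper divisors sums to n
--     # This part is a bit tricky and requires checking all subsets, which is not O(N)
--     # For simplicity, we assume this part is handled correctly in the problem constraints
--     # Here, we just return 1 if the sum is greater and no subset sums to n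
--     return 1
-- ===== SOURCE B (Python) =====
-- def is_weird(n: int) -> int:
--     # Sum proper divisors by pairing d with n//d up to sqrt(n): O(sqrt n).
--     s = 0
--     if n >= 2:
--         s = 1
--         i = 2
--         while i * i <= n:
--             if n % i == 0:
--                 s += i
--                 j = n // i
--                 if j != i:
--                     s += j
--             i += 1
--     return 1 if s > n else 0
-- ===== Notes on version B (the rewrite author's own statement) =====
-- stated objective: faster
-- what changed: B sums proper divisors by iterating only up to sqrt(n) and adding each divisor together with its cofactor n//i, instead of A's full scan over range(1, n).
import Mathlib
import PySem

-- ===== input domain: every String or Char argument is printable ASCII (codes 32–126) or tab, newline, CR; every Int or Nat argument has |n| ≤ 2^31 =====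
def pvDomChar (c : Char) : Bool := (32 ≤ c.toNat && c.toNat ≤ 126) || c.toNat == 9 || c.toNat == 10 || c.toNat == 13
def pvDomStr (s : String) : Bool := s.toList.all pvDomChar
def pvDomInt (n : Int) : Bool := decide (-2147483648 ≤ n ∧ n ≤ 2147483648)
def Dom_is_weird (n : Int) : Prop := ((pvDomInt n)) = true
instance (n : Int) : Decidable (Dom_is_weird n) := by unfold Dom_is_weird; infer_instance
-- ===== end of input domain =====

-- B sums proper divisors by pairing each divisor i with its cofactor n // i, iterating
-- only while i * i <= n, instead of A's full scan over range(1, n); returns agree everywhere.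

-- ===== PORT A =====
def is_weird (n : Int) : Int :=
  let s := (PySem.List.pyRange 1 n 1).foldl
    (fun s i => if PySem.Int.mod n i = 0 then s + i else s) 0
  if s ≤ n then 0 else 1

-- ===== PORT B =====
-- used by altLoop's termination proof
theorem pv_le_of_sq_le (i n : Int) (hi : 0 ≤ i) (h : i * i ≤ n) : i ≤ n := by
  by_cases h1 : 1 ≤ i
  · nlinarith [mul_nonneg (by omega : (0:Int) ≤ i - 1) hi]
  · have hi0 : i = 0 := by omega
    subst hi0; simpa using h

-- the while loop of Source B: i counts up while i*i ≤ n, accumulating s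
def altLoop (n i s : Int) : Int :=
  if h : i * i ≤ n then
    altLoop n (i + 1)
      (if PySem.Int.mod n i = 0 then
        (let s' := s + i
         let j := PySem.Int.floordiv n i
         if j ≠ i then s' + j else s')
       else s)
  else s
termination_by (n + 1 - i).toNat
decreasing_by
  rcases le_or_gt 0 i with hi | hi
  · have := pv_le_of_sq_le i n hi h
    omega
  · have : 0 ≤ i * i := mul_self_nonneg i
    omega

def is_weird_alt (n : Int) : Int :=
  let s := if 2 ≤ n then altLoop n 2 1 else 0
  if n < s then 1 else 0

-- ===== PRECONDITION & SPEC =====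
def Spec_is_weird (n : Int) (out : Int) : Prop := out = is_weird_alt n
instance (n : Int) (out : Int) : Decidable (Spec_is_weird n out) := by unfold Spec_is_weird; infer_instance

-- ===== CLAIM (what is proved, stated in full; the proofs are below) =====
def Claim_equal_is_weird : Prop := ∀ (n : Int), Dom_is_weird n → Spec_is_weird n (is_weird n)

-- ===== LEMMAS AND PROOFS =====

-- A's summand, B's summand, and the integer square root
def gA (n i : Int) : Int := if PySem.Int.mod n i = 0 then i else 0
def fB (n j : Int) : Int :=
  if PySem.Int.mod n j = 0 then
    j + (if PySem.Int.floordiv n j ≠ j then PySem.Int.floordiv n j else 0)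
  else 0
def rt (n : Int) : Int := (Nat.sqrt n.toNat : Int)

theorem sq_le_iff_le_rt (n i : Int) (hn : 0 ≤ n) (hi : 0 ≤ i) : i * i ≤ n ↔ i ≤ rt n := by
  obtain ⟨a, rfl⟩ := Int.eq_ofNat_of_zero_le hi
  obtain ⟨m, rfl⟩ := Int.eq_ofNat_of_zero_le hn
  unfold rt
  simp only [Int.toNat_natCast]
  rw [← Nat.cast_mul, Nat.cast_le, Nat.cast_le, ← pow_two]
  exact Nat.le_sqrt'.symm

theorem ico_insert_left (a b : Int) (h : a < b) :
    Finset.Ico a b = insert a (Finset.Ico (a + 1) b) := by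
  ext x
  simp only [Finset.mem_Ico, Finset.mem_insert]
  omega

theorem ico_insert_right (a b : Int) (h : a ≤ b) :
    Finset.Ico a (b + 1) = insert b (Finset.Ico a b) := by
  ext x
  simp only [Finset.mem_Ico, Finset.mem_insert]
  omega

theorem foldA_gen (n : Int) : ∀ (k : Nat) (b : Int), (b - 1).toNat = k →
    (PySem.List.pyRange 1 b 1).foldl (fun s i => if PySem.Int.mod n i = 0 then s + i else s) 0
      = ∑ i ∈ Finset.Ico 1 b, gA n i := by
  intro k
  induction k with
  | zero =>
    intro b hb
    rw [PySem.List.pyRange_one_eq_nil (by omega), Finset.Ico_eq_empty (by omega)]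
    simp
  | succ k ih =>
    intro b hb
    have hb1 : b = (b - 1) + 1 := by omega
    rw [hb1, PySem.List.pyRange_one_succ_right (by omega), List.foldl_append,
        ih (b - 1) (by omega), ico_insert_right 1 (b - 1) (by omega),
        Finset.sum_insert (by simp)]
    simp only [List.foldl_cons, List.foldl_nil]
    unfold gA
    split_ifs <;> ring

theorem foldA (n : Int) :
    (PySem.List.pyRange 1 n 1).foldl (fun s i => if PySem.Int.mod n i = 0 then s + i else s) 0
      = ∑ i ∈ Finset.Ico 1 n, gA n i :=
  foldA_gen n (n - 1).toNat n rfl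

theorem altLoop_sum (n : Int) (hn : 0 ≤ n) :
    ∀ (k : Nat) (i s : Int), 0 ≤ i → (n + 1 - i).toNat = k →
      altLoop n i s = s + ∑ j ∈ Finset.Ico i (rt n + 1), fB n j := by
  intro k
  induction k with
  | zero =>
    intro i s hi hk
    have hni : n < i := by omega
    have hii : ¬ i * i ≤ n := by nlinarith
    rw [altLoop, dif_neg hii]
    have hrt : rt n ≤ n := by
      have := Nat.sqrt_le_self n.toNat
      unfold rt; omega
    rw [Finset.Ico_eq_empty (by omega)]
    simp
  | succ k ih =>
    intro i s hi hk
    by_cases h : i * i ≤ n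
    · have hin : i ≤ n := pv_le_of_sq_le i n hi h
      have hir : i ≤ rt n := (sq_le_iff_le_rt n i hn hi).mp h
      rw [altLoop, dif_pos h, ih (i + 1) _ (by omega) (by omega),
          ico_insert_left i (rt n + 1) (by omega), Finset.sum_insert (by simp)]
      unfold fB
      simp only [ne_eq]
      split_ifs <;> ring
    · have hir : rt n < i := by
        by_contra hc
        exact h ((sq_le_iff_le_rt n i hn hi).mpr (by omega))
      rw [altLoop, dif_neg h, Finset.Ico_eq_empty (by omega)]
      simp

-- the pairing argument: divisors of n that exceed √n are exactly the cofactors n / j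
-- of the divisors 2 ≤ j ≤ √n with n / j ≠ j
theorem key_sum (n : Int) (hn : 2 ≤ n) :
    ∑ i ∈ Finset.Ico 1 n, gA n i = 1 + ∑ j ∈ Finset.Ico 2 (rt n + 1), fB n j := by
  have hn0 : (0:Int) ≤ n := by omega
  rw [ico_insert_left 1 n (by omega), Finset.sum_insert (by simp)]
  have h1 : gA n 1 = 1 := by
    unfold gA
    rw [if_pos (by rw [PySem.Int.mod_eq_zero_iff_dvd]; exact one_dvd n)]
  rw [h1]
  congr 1
  rw [show (1:Int) + 1 = 2 from by norm_num]
  -- filtered forms of both sums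
  have hga : ∑ i ∈ Finset.Ico 2 n, gA n i
      = ∑ i ∈ (Finset.Ico 2 n).filter (fun i => PySem.Int.mod n i = 0), i := by
    rw [Finset.sum_filter]; rfl
  have hfb : ∑ j ∈ Finset.Ico 2 (rt n + 1), fB n j
      = (∑ j ∈ (Finset.Ico 2 (rt n + 1)).filter (fun j => PySem.Int.mod n j = 0), j)
        + ∑ j ∈ ((Finset.Ico 2 (rt n + 1)).filter (fun j => PySem.Int.mod n j = 0)).filter
            (fun j => ¬ PySem.Int.floordiv n j = j), PySem.Int.floordiv n j := by
    rw [Finset.sum_filter (fun j => ¬ PySem.Int.floordiv n j = j), ← Finset.sum_add_distrib,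
        Finset.sum_filter]
    apply Finset.sum_congr rfl
    intro j _
    unfold fB
    simp only [ne_eq]
  rw [hga, hfb]
  set S := (Finset.Ico 2 n).filter (fun i => PySem.Int.mod n i = 0) with hS
  set T := (Finset.Ico 2 (rt n + 1)).filter (fun j => PySem.Int.mod n j = 0) with hT
  have hsplit := Finset.sum_filter_add_sum_filter_not S (fun i => i * i ≤ n) (fun i => i)
  have hTS : S.filter (fun i => i * i ≤ n) = T := by
    ext x
    simp only [hS, hT, Finset.mem_filter, Finset.mem_Ico]
    constructor
    · rintro ⟨⟨⟨h2, _⟩, hm⟩, hx⟩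
      exact ⟨⟨h2, by have := (sq_le_iff_le_rt n x hn0 (by omega)).mp hx; omega⟩, hm⟩
    · rintro ⟨⟨h2, hx⟩, hm⟩
      have hsq : x * x ≤ n := (sq_le_iff_le_rt n x hn0 (by omega)).mpr (by omega)
      exact ⟨⟨⟨h2, by nlinarith⟩, hm⟩, hsq⟩
  rw [hTS] at hsplit
  rw [← hsplit]
  congr 1
  -- the bijection x ↦ n / x between big divisors and small cofactors
  apply Finset.sum_nbij' (fun x => n / x) (fun x => n / x)
  · intro a ha
    simp only [hS, Finset.mem_filter, Finset.mem_Ico] at ha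
    obtain ⟨⟨⟨ha2, han⟩, hamod⟩, hasq⟩ := ha
    rw [PySem.Int.mod_eq_zero_iff_dvd] at hamod
    have hac : a * (n / a) = n := Int.mul_ediv_cancel' hamod
    have hc1 : 0 < n / a := by nlinarith
    have hca : n / a < a := by nlinarith
    have hc2 : 2 ≤ n / a := by nlinarith
    have hcsq : (n / a) * (n / a) ≤ n := by nlinarith
    have hback : n / (n / a) = a := by
      nth_rewrite 1 [← hac]
      exact Int.mul_ediv_cancel a (by omega)
    simp only [hT, Finset.mem_filter, Finset.mem_Ico]
    refine ⟨⟨⟨hc2, ?_⟩, ?_⟩, ?_⟩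
    · have := (sq_le_iff_le_rt n (n / a) hn0 (by omega)).mp hcsq; omega
    · rw [PySem.Int.mod_eq_zero_iff_dvd]
      exact ⟨a, by rw [mul_comm]; omega⟩
    · rw [PySem.Int.floordiv_eq_ediv_of_pos (show (0:Int) < n / a by omega), hback]; omega
  · intro b hb
    simp only [hT, Finset.mem_filter, Finset.mem_Ico] at hb
    obtain ⟨⟨⟨hb2, hbr⟩, hbmod⟩, hbne⟩ := hb
    rw [PySem.Int.mod_eq_zero_iff_dvd] at hbmod
    rw [PySem.Int.floordiv_eq_ediv_of_pos (show (0:Int) < b by omega)] at hbne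
    have hbd : b * (n / b) = n := Int.mul_ediv_cancel' hbmod
    have hbsq : b * b ≤ n := (sq_le_iff_le_rt n b hn0 (by omega)).mpr (by omega)
    have hd1 : 0 < n / b := by nlinarith
    have hbd' : b < n / b := by
      rcases lt_or_ge b (n / b) with h | h
      · exact h
      · exfalso; exact hbne (by nlinarith)
    simp only [hS, Finset.mem_filter, Finset.mem_Ico]
    refine ⟨⟨⟨by omega, by nlinarith⟩, ?_⟩, by nlinarith⟩
    rw [PySem.Int.mod_eq_zero_iff_dvd]
    exact ⟨b, by rw [mul_comm]; omega⟩
  · intro a ha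
    simp only [hS, Finset.mem_filter, Finset.mem_Ico] at ha
    obtain ⟨⟨⟨ha2, _⟩, hamod⟩, _⟩ := ha
    rw [PySem.Int.mod_eq_zero_iff_dvd] at hamod
    have hac : a * (n / a) = n := Int.mul_ediv_cancel' hamod
    have hc1 : 0 < n / a := by nlinarith
    nth_rewrite 1 [← hac]
    exact Int.mul_ediv_cancel a (by omega)
  · intro b hb
    simp only [hT, Finset.mem_filter, Finset.mem_Ico] at hb
    obtain ⟨⟨⟨hb2, _⟩, hbmod⟩, _⟩ := hb
    rw [PySem.Int.mod_eq_zero_iff_dvd] at hbmod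
    have hbd : b * (n / b) = n := Int.mul_ediv_cancel' hbmod
    have hd1 : 0 < n / b := by nlinarith
    nth_rewrite 1 [← hbd]
    exact Int.mul_ediv_cancel b (by omega)
  · intro a ha
    simp only [hS, Finset.mem_filter, Finset.mem_Ico] at ha
    obtain ⟨⟨⟨ha2, _⟩, hamod⟩, _⟩ := ha
    rw [PySem.Int.mod_eq_zero_iff_dvd] at hamod
    have hac : a * (n / a) = n := Int.mul_ediv_cancel' hamod
    have hc1 : 0 < n / a := by nlinarith
    rw [PySem.Int.floordiv_eq_ediv_of_pos (show (0:Int) < n / a by omega)]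
    nth_rewrite 1 [← hac]
    exact (Int.mul_ediv_cancel a (by omega)).symm

-- ===== VERDICT (by name: the statement is the Claim_ definition above) =====
theorem is_weird_spec : Claim_equal_is_weird := by
  intro n _
  unfold Spec_is_weird is_weird is_weird_alt
  show (if (PySem.List.pyRange 1 n 1).foldl
          (fun s i => if PySem.Int.mod n i = 0 then s + i else s) 0 ≤ n then (0:Int) else 1)
      = (if n < (if 2 ≤ n then altLoop n 2 1 else 0) then (1:Int) else 0)
  rw [foldA]
  rcases le_or_gt 2 n with hn | hn
  · rw [if_pos hn, altLoop_sum n (by omega) (n + 1 - 2).toNat 2 1 (by omega) rfl,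
        key_sum n hn]
    split_ifs <;> omega
  · rw [if_neg (show ¬ (2:Int) ≤ n by omega), Finset.Ico_eq_empty (by omega)]
    simp only [Finset.sum_empty]
    split_ifs <;> omega
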